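-- pv_equiv track=rewrite | github.com/Patrycja1311/Codewars | kata_7kyu/waiting_room/waiting_room.py | last_chair
-- ===== SOURCE A (Python) =====
-- def last_chair(n):
--     import heapq
--     heap = []
--     heapq.heappush(heap, (-(n - 1), 1, n))
--     for _ in range(n - 1):
--         dist, l, r = heapq.heappop(heap)
--         if l == 1:
--             seat = 1
--         elif r == n:
--             seat = n
--         else:
--             seat = (l + r) // 2
--         if l <= seat - 1:
--             new_dist = (seat - 1 - l)
--             heapq.heappush(heap, (-new_dist, l, seat - 1))
--         if seat + 1 <= r:
--             new_dist = (r - (seat + 1))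
--             heapq.heappush(heap, (-new_dist, seat + 1, r))
--     dist, l, r = heapq.heappop(heap)
--     if l == 1:
--         return 1
--     elif r == n:
--         return n
--     else:
--         return (l + r) // 2
-- ===== SOURCE B (Python) =====
-- def last_chair(n):
--     # Generate the whole tree of gaps with a plain stack (order irrelevant) and keep
--     # the maximal (-dist, l, r) tuple: the heap pops tuples in increasing order and
--     # drains exactly this tree, so the last person's gap is the maximal tuple.
--     stack = [(-(n - 1), 1, n)]
--     best = None
--     while stack:
--         t = stack.pop()
--         if best is None or t > best:
--             best = t
--         dist, l, r = t
--         if l == 1: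
--             seat = 1
--         elif r == n:
--             seat = n
--         else:
--             seat = (l + r) // 2
--         if l <= seat - 1:
--             stack.append((-(seat - 1 - l), l, seat - 1))
--         if seat + 1 <= r:
--             stack.append((-(r - (seat + 1)), seat + 1, r))
--     dist, l, r = best
--     if l == 1:
--         return 1
--     elif r == n:
--         return n
--     else:
--         return (l + r) // 2
-- ===== Notes on version B (the rewrite author's own statement) =====
-- stated objective: faster
-- what changed: Replaces the heap simulation entirely: B generates the tree of gap intervals with a plain stack and returns the seat of the maximal (-dist, l, r) tuple, since the heap pops tuples in increasing order and the last pop is the tree maximum.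
import Mathlib
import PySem

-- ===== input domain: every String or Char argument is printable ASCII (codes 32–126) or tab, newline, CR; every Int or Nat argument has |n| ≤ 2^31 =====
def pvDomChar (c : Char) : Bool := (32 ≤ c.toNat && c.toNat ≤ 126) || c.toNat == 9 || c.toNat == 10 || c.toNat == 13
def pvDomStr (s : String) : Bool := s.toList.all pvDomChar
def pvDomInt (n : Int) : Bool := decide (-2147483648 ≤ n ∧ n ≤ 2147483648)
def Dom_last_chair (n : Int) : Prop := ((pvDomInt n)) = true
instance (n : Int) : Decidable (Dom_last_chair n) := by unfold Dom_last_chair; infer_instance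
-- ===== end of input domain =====

-- B replaces A's heap simulation by generating the whole tree of gap intervals with a
-- plain stack and returning the seat of the maximal (-dist, l, r) tuple (objective: faster).

abbrev Tri : Type := Int × Int × Int

-- Python's lexicographic ≤ / < on int triples (tuple comparison)
def tLe (a b : Tri) : Bool :=
  decide (a.1 < b.1) || (decide (a.1 = b.1) &&
    (decide (a.2.1 < b.2.1) || (decide (a.2.1 = b.2.1) && decide (a.2.2 ≤ b.2.2))))

def tLt (a b : Tri) : Bool :=
  decide (a.1 < b.1) || (decide (a.1 = b.1) &&
    (decide (a.2.1 < b.2.1) || (decide (a.2.1 = b.2.1) && decide (a.2.2 < b.2.2))))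

-- the seat chosen for a gap [l, r] and the two sub-gap tuples (shared text of both Pythons)
def seatOf (n l r : Int) : Int :=
  if l = 1 then 1 else if r = n then n else PySem.Int.floordiv (l + r) 2

def childL (l seat : Int) : Tri := (-(seat - 1 - l), l, seat - 1)

def childR (r seat : Int) : Tri := (-(r - (seat + 1)), seat + 1, r)

-- tuple weight used only as a termination measure
def wt (t : Tri) : Nat := 2 * (t.2.2 - t.2.1 + 1).toNat + 1

theorem seat_facts (n l r : Int) :
    (l ≤ seatOf n l r - 1 → l + 1 ≤ seatOf n l r ∧ seatOf n l r ≤ r) ∧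
    (seatOf n l r + 1 ≤ r → l ≤ seatOf n l r ∧ seatOf n l r ≤ r - 1) := by
  unfold seatOf
  split_ifs with h1 h2
  · omega
  · omega
  · rw [PySem.Int.floordiv_eq_ediv_of_pos (by norm_num)]
    omega

-- termination bound for the stack loop and the tree recursion
theorem children_wt_lt (n l r : Int) :
    ((if seatOf n l r + 1 ≤ r then [childR r (seatOf n l r)] else []).map wt).sum +
    ((if l ≤ seatOf n l r - 1 then [childL l (seatOf n l r)] else []).map wt).sum <
    2 * (r - l + 1).toNat + 1 := by
  obtain ⟨f1, f2⟩ := seat_facts n l r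
  split_ifs with g2 g1
  · simp only [List.map_cons, List.map_nil, List.sum_cons, List.sum_nil, childL, childR, wt]
    omega
  · simp only [List.map_cons, List.map_nil, List.sum_cons, List.sum_nil, childR, wt,
      List.map_nil, List.sum_nil]
    omega
  · simp only [List.map_cons, List.map_nil, List.sum_cons, List.sum_nil, childL, wt,
      List.map_nil, List.sum_nil]
    omega
  · simp only [List.map_nil, List.sum_nil]
    omega

-- ===== PORT A =====
-- heapq.heappush / heappop ported as a skew-heap priority queue: heappop returns exactly
-- the least tuple (all that A observes of the heap; the live tuples are pairwise distinct).
inductive SHeap : Type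
  | leaf : SHeap
  | node : Tri → SHeap → SHeap → SHeap

def SHeap.size : SHeap → Nat
  | .leaf => 0
  | .node _ l r => l.size + r.size + 1

def hmerge : SHeap → SHeap → SHeap
  | .leaf, t => t
  | t, .leaf => t
  | .node a l1 r1, .node b l2 r2 =>
      if tLe a b then SHeap.node a (hmerge (SHeap.node b l2 r2) r1) l1
      else SHeap.node b (hmerge (SHeap.node a l1 r1) r2) l2
termination_by s t => s.size + t.size
decreasing_by all_goals (simp only [SHeap.size]; omega)

def hpush (x : Tri) (h : SHeap) : SHeap := hmerge (SHeap.node x SHeap.leaf SHeap.leaf) h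

def aStep (n : Int) (h : SHeap) : SHeap :=
  match h with
  | .leaf => .leaf   -- totality guard; Python's heap is never empty at a pop
  | .node (_, l, r) hl hr =>
      let rest := hmerge hl hr
      let h1 := if l ≤ seatOf n l r - 1 then hpush (childL l (seatOf n l r)) rest else rest
      if seatOf n l r + 1 ≤ r then hpush (childR r (seatOf n l r)) h1 else h1

def last_chair (n : Int) : Int :=
  let h := (PySem.List.pyRange 0 (n - 1) 1).foldl (fun h _ => aStep n h)
    (hpush (-(n - 1), 1, n) SHeap.leaf)
  match h with
  | .leaf => 0   -- totality guard; Python's heap is never empty at the final pop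
  | .node (_, l, r) _ _ => if l = 1 then 1 else if r = n then n else PySem.Int.floordiv (l + r) 2

-- ===== PORT B =====
-- the while-stack loop of Source B: pop a tuple (head = python's list end), fold it into the
-- running maximum (python's `t > best`), push the sub-gap tuples under the same guards
def bLoop (n : Int) (stack : List Tri) (best : Option Tri) : Option Tri :=
  match stack with
  | [] => best
  | (d, l, r) :: rest =>
      let best' : Option Tri := match best with
        | none => some (d, l, r)
        | some b => if tLt b (d, l, r) then some (d, l, r) else some b
      bLoop n ((if seatOf n l r + 1 ≤ r then [childR r (seatOf n l r)] else []) ++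
               (if l ≤ seatOf n l r - 1 then [childL l (seatOf n l r)] else []) ++ rest) best'
termination_by (stack.map wt).sum
decreasing_by
  simp only [dite_eq_ite, List.map_append, List.sum_append, List.map_cons, List.sum_cons, wt]
  have := children_wt_lt n l r
  omega

def last_chair_alt (n : Int) : Int :=
  match bLoop n [(-(n - 1), 1, n)] none with
  | none => 0   -- unreachable guard: the stack starts nonempty, so best is set
  | some (_, l, r) => if l = 1 then 1 else if r = n then n else PySem.Int.floordiv (l + r) 2

-- ===== PRECONDITION & SPEC =====
def Spec_last_chair (n : Int) (out : Int) : Prop := out = last_chair_alt n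
instance (n : Int) (out : Int) : Decidable (Spec_last_chair n out) := by unfold Spec_last_chair; infer_instance

-- ===== CLAIM (what is proved, stated in full; the proofs are below) =====
def Claim_equal_last_chair : Prop := ∀ (n : Int), Dom_last_chair n → Spec_last_chair n (last_chair n)

-- ===== LEMMAS AND PROOFS =====

theorem tLe_refl (a : Tri) : tLe a a = true := by
  obtain ⟨a1, a2, a3⟩ := a; simp [tLe]

theorem tLe_total {a b : Tri} (h : tLe a b = false) : tLe b a = true := by
  obtain ⟨a1, a2, a3⟩ := a; obtain ⟨b1, b2, b3⟩ := b
  simp [tLe] at h ⊢; omega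

theorem tLe_antisymm {a b : Tri} (h1 : tLe a b = true) (h2 : tLe b a = true) : a = b := by
  obtain ⟨a1, a2, a3⟩ := a; obtain ⟨b1, b2, b3⟩ := b
  simp [tLe] at h1 h2; simp; omega

theorem tLe_trans {a b c : Tri} (h1 : tLe a b = true) (h2 : tLe b c = true) : tLe a c = true := by
  obtain ⟨a1, a2, a3⟩ := a; obtain ⟨b1, b2, b3⟩ := b; obtain ⟨c1, c2, c3⟩ := c
  simp [tLe] at h1 h2 ⊢; omega

theorem tLt_imp_le {a b : Tri} (h : tLt a b = true) : tLe a b = true := by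
  obtain ⟨a1, a2, a3⟩ := a; obtain ⟨b1, b2, b3⟩ := b
  simp [tLt] at h; simp [tLe]; omega

theorem not_tLt_imp_le {a b : Tri} (h : tLt a b = false) : tLe b a = true := by
  obtain ⟨a1, a2, a3⟩ := a; obtain ⟨b1, b2, b3⟩ := b
  simp [tLt] at h; simp [tLe]; omega

def toL : SHeap → List Tri
  | .leaf => []
  | .node a l r => a :: (toL l ++ toL r)

def HO : SHeap → Prop
  | .leaf => True
  | .node a l r => (∀ y ∈ toL (SHeap.node a l r), tLe a y = true) ∧ HO l ∧ HO r

theorem hmerge_perm (s t : SHeap) : (toL (hmerge s t)).Perm (toL s ++ toL t) := by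
  fun_induction hmerge s t with
  | case1 t => simp [toL]
  | case2 t => simp [toL]
  | case3 a l1 r1 b l2 r2 hab ih =>
      simp only [toL, List.cons_append]
      refine List.Perm.cons a ?_
      refine (ih.append_right _).trans ?_
      refine List.perm_iff_count.mpr ?_
      intro x
      simp only [toL, List.count_append, List.count_cons]
      omega
  | case4 a l1 r1 b l2 r2 hab ih =>
      simp only [toL]
      refine List.Perm.trans (List.Perm.cons b (ih.append_right _)) ?_
      refine List.perm_iff_count.mpr ?_
      intro x
      simp only [toL, List.count_append, List.count_cons]
      omega

theorem mem_node {y : Tri} {a : Tri} {l r : SHeap} :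
    y ∈ toL (SHeap.node a l r) ↔ y = a ∨ y ∈ toL l ∨ y ∈ toL r := by
  simp [toL]

theorem hmerge_HO {s t : SHeap} (hs : HO s) (ht : HO t) : HO (hmerge s t) := by
  fun_induction hmerge s t with
  | case1 t => simpa using ht
  | case2 t => simpa using hs
  | case3 a l1 r1 b l2 r2 hab ih =>
      obtain ⟨ha, hl1, hr1⟩ := hs
      obtain ⟨hb, hl2, hr2⟩ := ht
      refine ⟨?_, ih ⟨hb, hl2, hr2⟩ hr1, hl1⟩
      intro y hy
      rcases mem_node.mp hy with hy | hy | hy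
      · rw [hy]; exact tLe_refl a
      · rcases List.mem_append.mp ((hmerge_perm (SHeap.node b l2 r2) r1).mem_iff.mp hy) with h | h
        · rcases mem_node.mp h with h' | h' | h'
          · rw [h']; exact hab
          · exact tLe_trans hab (hb _ (mem_node.mpr (Or.inr (Or.inl h'))))
          · exact tLe_trans hab (hb _ (mem_node.mpr (Or.inr (Or.inr h'))))
        · exact ha _ (mem_node.mpr (Or.inr (Or.inr h)))
      · exact ha _ (mem_node.mpr (Or.inr (Or.inl hy)))
  | case4 a l1 r1 b l2 r2 hab ih =>
      obtain ⟨ha, hl1, hr1⟩ := hs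
      obtain ⟨hb, hl2, hr2⟩ := ht
      have hba : tLe b a = true := tLe_total (by simpa using hab)
      refine ⟨?_, ih ⟨ha, hl1, hr1⟩ hr2, hl2⟩
      intro y hy
      rcases mem_node.mp hy with hy | hy | hy
      · rw [hy]; exact tLe_refl b
      · rcases List.mem_append.mp ((hmerge_perm (SHeap.node a l1 r1) r2).mem_iff.mp hy) with h | h
        · rcases mem_node.mp h with h' | h' | h'
          · rw [h']; exact hba
          · exact tLe_trans hba (ha _ (mem_node.mpr (Or.inr (Or.inl h'))))
          · exact tLe_trans hba (ha _ (mem_node.mpr (Or.inr (Or.inr h'))))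
        · exact hb _ (mem_node.mpr (Or.inr (Or.inr h)))
      · exact hb _ (mem_node.mpr (Or.inr (Or.inl hy)))

theorem hpush_perm (x : Tri) (h : SHeap) : (toL (hpush x h)).Perm (x :: toL h) := by
  have := hmerge_perm (SHeap.node x SHeap.leaf SHeap.leaf) h
  simpa [hpush, toL] using this

theorem hpush_HO {x : Tri} {h : SHeap} (hh : HO h) : HO (hpush x h) := by
  refine hmerge_HO ?_ hh
  refine ⟨?_, trivial, trivial⟩
  intro y hy
  rcases mem_node.mp hy with hy | hy | hy
  · rw [hy]; exact tLe_refl x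
  · simp [toL] at hy
  · simp [toL] at hy

-- the tree of all gap tuples ever generated from one tuple
def genList (n : Int) (t : Tri) : List Tri :=
  match t with
  | (d, l, r) =>
      (d, l, r) :: ((if l ≤ seatOf n l r - 1 then genList n (childL l (seatOf n l r)) else []) ++
                    (if seatOf n l r + 1 ≤ r then genList n (childR r (seatOf n l r)) else []))
termination_by wt t
decreasing_by
  · obtain ⟨f1, f2⟩ := seat_facts n l r
    simp only [wt, childL]
    omega
  · obtain ⟨_, f2⟩ := seat_facts n l r
    simp only [wt, childR]
    omega

theorem genList_eq (n d l r : Int) : genList n (d, l, r) =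
    (d, l, r) :: ((if l ≤ seatOf n l r - 1 then genList n (childL l (seatOf n l r)) else []) ++
                  (if seatOf n l r + 1 ≤ r then genList n (childR r (seatOf n l r)) else [])) := by
  rw [genList]

-- a tuple whose first component is minus its gap width dominates its whole tree
def POK (t : Tri) : Prop := t.1 = -(t.2.2 - t.2.1)

theorem child_ge_left {n l r : Int} (hg : l ≤ seatOf n l r - 1) :
    tLe (-(r - l), l, r) (childL l (seatOf n l r)) = true := by
  obtain ⟨f1, f2⟩ := seat_facts n l r
  simp [childL, tLe]
  omega

theorem child_ge_right {n l r : Int} (hg : seatOf n l r + 1 ≤ r) :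
    tLe (-(r - l), l, r) (childR r (seatOf n l r)) = true := by
  obtain ⟨f1, f2⟩ := seat_facts n l r
  simp [childR, tLe]
  omega

theorem childL_POK {l seat : Int} : POK (childL l seat) := by simp [childL, POK]

theorem childR_POK {r seat : Int} : POK (childR r seat) := by simp [childR, POK]

theorem gen_ge (n : Int) : ∀ (t : Tri), POK t → ∀ y ∈ genList n t, tLe t y = true := by
  intro t
  fun_induction genList n t with
  | case1 d l r ihL ihR =>
      intro hp y hy
      rw [List.mem_cons, List.mem_append] at hy
      have hd : d = -(r - l) := by simpa [POK] using hp
      subst hd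
      rcases hy with hy | hy | hy
      · rw [hy]; exact tLe_refl _
      · by_cases hg : l ≤ seatOf n l r - 1
        · rw [if_pos hg] at hy
          exact tLe_trans (child_ge_left hg) (ihL hg childL_POK y hy)
        · rw [if_neg hg] at hy; simp at hy
      · by_cases hg : seatOf n l r + 1 ≤ r
        · rw [if_pos hg] at hy
          exact tLe_trans (child_ge_right hg) (ihR hg childR_POK y hy)
        · rw [if_neg hg] at hy; simp at hy

-- heap invariants: every tuple is (-width, l, r) with a nonempty gap
def AllP (h : SHeap) : Prop := ∀ t ∈ toL h, POK t

def AllSz (h : SHeap) : Prop := ∀ t ∈ toL h, t.2.1 ≤ t.2.2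

def sz (t : Tri) : Nat := (t.2.2 - t.2.1 + 1).toNat

def totalSize (h : SHeap) : Nat := ((toL h).map sz).sum

def gens (n : Int) (h : SHeap) : List Tri := (toL h).flatMap (genList n)

-- what one A-iteration does to the heap contents
theorem astep_perm (n d l r : Int) (hl hr : SHeap) :
    (toL (aStep n (SHeap.node (d, l, r) hl hr))).Perm
    ((toL hl ++ toL hr) ++
     ((if l ≤ seatOf n l r - 1 then [childL l (seatOf n l r)] else []) ++
      (if seatOf n l r + 1 ≤ r then [childR r (seatOf n l r)] else []))) := by
  simp only [aStep]
  split_ifs with g1 g2 g2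
  · refine (hpush_perm _ _).trans ?_
    refine (List.Perm.cons _ ((hpush_perm _ _).trans ((hmerge_perm hl hr).cons _))).trans ?_
    refine List.perm_iff_count.mpr ?_
    intro x
    simp [List.count_append, List.count_cons]
    omega
  · refine ((hpush_perm _ _).trans ((hmerge_perm hl hr).cons _)).trans ?_
    refine List.perm_iff_count.mpr ?_
    intro x
    simp [List.count_append, List.count_cons]
    omega
  · refine ((hpush_perm _ _).trans ((hmerge_perm hl hr).cons _)).trans ?_
    refine List.perm_iff_count.mpr ?_
    intro x
    simp [List.count_append, List.count_cons]
    omega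
  · refine (hmerge_perm hl hr).trans ?_
    simp

theorem astep_HO {n : Int} {h : SHeap} (hh : HO h) : HO (aStep n h) := by
  cases h with
  | leaf => exact trivial
  | node x hl hr =>
      obtain ⟨d, l, r⟩ := x
      obtain ⟨ha, hhl, hhr⟩ := hh
      simp only [aStep]
      have hrest : HO (hmerge hl hr) := hmerge_HO hhl hhr
      split_ifs <;>
        first
          | exact hpush_HO (hpush_HO hrest)
          | exact hpush_HO hrest
          | exact hrest

theorem mem_astep {n d l r : Int} {hl hr : SHeap} {y : Tri}
    (hy : y ∈ toL (aStep n (SHeap.node (d, l, r) hl hr))) :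
    y ∈ toL hl ++ toL hr ∨
    (l ≤ seatOf n l r - 1 ∧ y = childL l (seatOf n l r)) ∨
    (seatOf n l r + 1 ≤ r ∧ y = childR r (seatOf n l r)) := by
  have hmem := (astep_perm n d l r hl hr).mem_iff.mp hy
  simp only [List.mem_append] at hmem
  rcases hmem with (h | h) | h | h
  · exact Or.inl (List.mem_append.mpr (Or.inl h))
  · exact Or.inl (List.mem_append.mpr (Or.inr h))
  · split_ifs at h with g
    · simp at h; exact Or.inr (Or.inl ⟨g, h⟩)
    · simp at h
  · split_ifs at h with g
    · simp at h; exact Or.inr (Or.inr ⟨g, h⟩)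
    · simp at h

theorem mem_astep_of_rest {n d l r : Int} {hl hr : SHeap} {y : Tri}
    (hy : y ∈ toL hl ++ toL hr) : y ∈ toL (aStep n (SHeap.node (d, l, r) hl hr)) := by
  refine (astep_perm n d l r hl hr).symm.mem_iff.mp ?_
  exact List.mem_append.mpr (Or.inl hy)

theorem mem_astep_of_childL {n d l r : Int} {hl hr : SHeap}
    (g : l ≤ seatOf n l r - 1) :
    childL l (seatOf n l r) ∈ toL (aStep n (SHeap.node (d, l, r) hl hr)) := by
  have hc : childL l (seatOf n l r) ∈ (if l ≤ seatOf n l r - 1 then [childL l (seatOf n l r)] else []) := by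
    rw [if_pos g]; simp
  exact (astep_perm n d l r hl hr).symm.mem_iff.mp
    (List.mem_append.mpr (Or.inr (List.mem_append.mpr (Or.inl hc))))

theorem mem_astep_of_childR {n d l r : Int} {hl hr : SHeap}
    (g : seatOf n l r + 1 ≤ r) :
    childR r (seatOf n l r) ∈ toL (aStep n (SHeap.node (d, l, r) hl hr)) := by
  have hc : childR r (seatOf n l r) ∈ (if seatOf n l r + 1 ≤ r then [childR r (seatOf n l r)] else []) := by
    rw [if_pos g]; simp
  exact (astep_perm n d l r hl hr).symm.mem_iff.mp
    (List.mem_append.mpr (Or.inr (List.mem_append.mpr (Or.inr hc))))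

theorem astep_AllP {n : Int} {d l r : Int} {hl hr : SHeap}
    (hp : AllP (SHeap.node (d, l, r) hl hr)) : AllP (aStep n (SHeap.node (d, l, r) hl hr)) := by
  intro y hy
  rcases mem_astep hy with h | ⟨_, h⟩ | ⟨_, h⟩
  · exact hp y (mem_node.mpr (Or.inr (by rwa [← List.mem_append])))
  · rw [h]; exact childL_POK
  · rw [h]; exact childR_POK

theorem astep_AllSz {n : Int} {d l r : Int} {hl hr : SHeap}
    (hp : AllSz (SHeap.node (d, l, r) hl hr)) : AllSz (aStep n (SHeap.node (d, l, r) hl hr)) := by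
  intro y hy
  rcases mem_astep hy with h | ⟨g, h⟩ | ⟨g, h⟩
  · exact hp y (mem_node.mpr (Or.inr (by rwa [← List.mem_append])))
  · rw [h]; simp [childL]; omega
  · rw [h]; simp [childR]; omega

theorem astep_size {n : Int} {d l r : Int} {hl hr : SHeap}
    (hlr : l ≤ r) :
    totalSize (aStep n (SHeap.node (d, l, r) hl hr)) + 1 = totalSize (SHeap.node (d, l, r) hl hr) := by
  obtain ⟨f1, f2⟩ := seat_facts n l r
  have hseat : l ≤ seatOf n l r ∧ seatOf n l r ≤ r := by
    unfold seatOf at *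
    split_ifs at * with h1 h2
    · omega
    · omega
    · rw [PySem.Int.floordiv_eq_ediv_of_pos (by norm_num)] at *
      omega
  have hperm := (astep_perm n d l r hl hr).map sz
  unfold totalSize
  rw [hperm.sum_eq]
  simp only [toL, List.map_append, List.sum_append, List.map_cons, List.sum_cons]
  split_ifs with g1 g2 g2 <;>
    simp only [List.map_cons, List.map_nil, List.sum_cons, List.sum_nil, sz, childL, childR] <;>
    omega

-- A's loop as an iterator
def aIter (n : Int) : Nat → SHeap → SHeap
  | 0, h => h
  | k + 1, h => aIter n k (aStep n h)

theorem foldl_const_eq_iter (n : Int) (L : List Int) (h : SHeap) :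
    L.foldl (fun h _ => aStep n h) h = aIter n L.length h := by
  induction L generalizing h with
  | nil => rfl
  | cons a L ih => simp [aIter, ih]

-- MAIN: after totalSize−1 steps the heap root is the maximum of the generated tree
theorem main_lemma (n : Int) : ∀ (s : Nat) (h : SHeap), HO h → AllP h → AllSz h →
    totalSize h = s + 1 →
    ∃ d l r hl' hr', aIter n s h = SHeap.node (d, l, r) hl' hr' ∧
      (d, l, r) ∈ gens n h ∧ ∀ y ∈ gens n h, tLe y (d, l, r) = true := by
  intro s
  induction s with
  | zero =>
      intro h hHO hP hSz hTot
      cases h with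
      | leaf => simp [totalSize, toL] at hTot
      | node x hl hr =>
          obtain ⟨d, l, r⟩ := x
          have hlr : l ≤ r := hSz _ (mem_node.mpr (Or.inl rfl))
          have hone : sz (d, l, r) = 1 ∧ toL hl = [] ∧ toL hr = [] := by
            have h1 : 1 ≤ sz (d, l, r) := by simp [sz]; omega
            unfold totalSize at hTot
            simp only [toL, List.map_cons, List.sum_cons, List.map_append, List.sum_append] at hTot
            constructor
            · have : ∀ t ∈ toL hl ++ toL hr, 1 ≤ sz t := by
                intro t ht
                have := hSz t (mem_node.mpr (Or.inr (by rwa [← List.mem_append])))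
                have := hP t (mem_node.mpr (Or.inr (by rwa [← List.mem_append])))
                simp [sz]; omega
              omega
            · constructor
              · cases hcl : toL hl with
                | nil => rfl
                | cons a t =>
                    have h1a : 1 ≤ sz a := by
                      have := hSz a (mem_node.mpr (Or.inr (Or.inl (by rw [hcl]; simp))))
                      simp [sz]; omega
                    rw [hcl] at hTot
                    simp only [List.map_cons, List.sum_cons] at hTot
                    omega
              · cases hcr : toL hr with
                | nil => rfl
                | cons a t =>
                    have h1a : 1 ≤ sz a := by
                      have := hSz a (mem_node.mpr (Or.inr (Or.inr (by rw [hcr]; simp))))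
                      simp [sz]; omega
                    rw [hcr] at hTot
                    simp only [List.map_cons, List.sum_cons] at hTot
                    omega
          obtain ⟨hsz1, hnl, hnr⟩ := hone
          have hrl : r = l := by simp [sz] at hsz1; omega
          have hnochild : ¬ l ≤ seatOf n l r - 1 ∧ ¬ seatOf n l r + 1 ≤ r := by
            obtain ⟨f1, f2⟩ := seat_facts n l r
            constructor
            · intro hg; have := f1 hg; omega
            · intro hg; have := f2 hg; omega
          refine ⟨d, l, r, hl, hr, rfl, ?_, ?_⟩
          · unfold gens
            simp [toL, hnl, hnr, genList_eq]
          · intro y hy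
            unfold gens at hy
            simp [toL, hnl, hnr, genList_eq, hnochild.1, hnochild.2] at hy
            rw [show y = (d, l, r) from by simpa using hy]
            exact tLe_refl _
  | succ s ih =>
      intro h hHO hP hSz hTot
      cases h with
      | leaf => simp [totalSize, toL] at hTot
      | node x hl hr =>
          obtain ⟨d, l, r⟩ := x
          have hdP : POK (d, l, r) := hP _ (mem_node.mpr (Or.inl rfl))
          have hlr : l ≤ r := hSz _ (mem_node.mpr (Or.inl rfl))
          have hd : d = -(r - l) := by simpa [POK] using hdP
          have hAllSz' : AllSz (aStep n (SHeap.node (d, l, r) hl hr)) := astep_AllSz hSz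
          have hAllP' : AllP (aStep n (SHeap.node (d, l, r) hl hr)) := astep_AllP hP
          have hHO' : HO (aStep n (SHeap.node (d, l, r) hl hr)) := astep_HO hHO
          have hTot' : totalSize (aStep n (SHeap.node (d, l, r) hl hr)) = s + 1 := by
            have := astep_size (n := n) (d := d) (hl := hl) (hr := hr) hlr
            omega
          obtain ⟨d', l', r', hl', hr', hiter, hmem, hdom⟩ :=
            ih (aStep n (SHeap.node (d, l, r) hl hr)) hHO' hAllP' hAllSz' hTot'
          refine ⟨d', l', r', hl', hr', by simpa [aIter] using hiter, ?_, ?_⟩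
          · -- membership transfers back
            unfold gens at hmem ⊢
            rw [List.mem_flatMap] at hmem
            obtain ⟨t, htmem, hxin⟩ := hmem
            rcases mem_astep htmem with hrest | ⟨g, hc⟩ | ⟨g, hc⟩
            · exact List.mem_flatMap.mpr ⟨t, mem_node.mpr (Or.inr (by rwa [← List.mem_append])), hxin⟩
            · refine List.mem_flatMap.mpr ⟨(d, l, r), mem_node.mpr (Or.inl rfl), ?_⟩
              rw [genList_eq, List.mem_cons, List.mem_append, if_pos g]
              exact Or.inr (Or.inl (hc ▸ hxin))
            · refine List.mem_flatMap.mpr ⟨(d, l, r), mem_node.mpr (Or.inl rfl), ?_⟩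
              rw [genList_eq, List.mem_cons, List.mem_append, if_pos g]
              exact Or.inr (Or.inr (hc ▸ hxin))
          · -- dominance transfers back
            intro y hy
            unfold gens at hy
            rw [List.mem_flatMap] at hy
            obtain ⟨t, htmem, hyin⟩ := hy
            rcases mem_node.mp htmem with hthead | htrest
            · -- y is in the tree of the popped root
              rw [hthead] at hyin
              rw [genList_eq, List.mem_cons, List.mem_append] at hyin
              rcases hyin with hy0 | hy0 | hy0
              · -- y is the popped root itself: root ≤ everything that remains ≤ answer
                rw [hy0]
                unfold gens at hmem
                rw [List.mem_flatMap] at hmem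
                obtain ⟨t', ht'mem, hx'⟩ := hmem
                have hroot_t' : tLe (d, l, r) t' = true := by
                  rcases mem_astep ht'mem with hrest | ⟨g, hc⟩ | ⟨g, hc⟩
                  · exact hHO.1 t' (mem_node.mpr (Or.inr (by rwa [← List.mem_append])))
                  · rw [hc, hd]; exact child_ge_left g
                  · rw [hc, hd]; exact child_ge_right g
                exact tLe_trans hroot_t' (tLe_trans (gen_ge n t' (hAllP' t' ht'mem) _ hx') (tLe_refl _))
              · by_cases g : l ≤ seatOf n l r - 1
                · rw [if_pos g] at hy0
                  refine hdom y ?_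
                  unfold gens
                  exact List.mem_flatMap.mpr ⟨_, mem_astep_of_childL g, hy0⟩
                · rw [if_neg g] at hy0; simp at hy0
              · by_cases g : seatOf n l r + 1 ≤ r
                · rw [if_pos g] at hy0
                  refine hdom y ?_
                  unfold gens
                  exact List.mem_flatMap.mpr ⟨_, mem_astep_of_childR g, hy0⟩
                · rw [if_neg g] at hy0; simp at hy0
            · refine hdom y ?_
              unfold gens
              exact List.mem_flatMap.mpr
                ⟨t, mem_astep_of_rest (by rwa [List.mem_append]), hyin⟩

-- B's stack loop computes the first maximal element of best :: all generated tuples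
theorem bLoop_spec (n : Int) : ∀ (stack : List Tri) (best : Option Tri) (b : Tri),
    best = some b →
    ∃ m, bLoop n stack best = some m ∧
      (m = b ∨ ∃ t ∈ stack, m ∈ genList n t) ∧ tLe b m = true ∧
      ∀ t ∈ stack, ∀ y ∈ genList n t, tLe y m = true := by
  intro stack best b hb
  fun_induction bLoop n stack best generalizing b with
  | case1 best => exact ⟨b, by rw [hb], Or.inl rfl, tLe_refl b, by simp⟩
  | case2 best0 d l r rest best' ih =>
      subst hb
      have hb2 : best' = some (if tLt b (d, l, r) then (d, l, r) else b) := by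
        by_cases hc : tLt b (d, l, r) = true <;> simp [best', hc]
      obtain ⟨m, hres, hmem, hb2m, hdom⟩ := ih _ hb2
      have hble2 : tLe b (if tLt b (d, l, r) then (d, l, r) else b) = true := by
        by_cases hc : tLt b (d, l, r) = true
        · rw [if_pos hc]; exact tLt_imp_le hc
        · rw [if_neg hc]; exact tLe_refl b
      have htle2 : tLe (d, l, r) (if tLt b (d, l, r) then (d, l, r) else b) = true := by
        by_cases hc : tLt b (d, l, r) = true
        · rw [if_pos hc]; exact tLe_refl _
        · rw [if_neg hc]; exact not_tLt_imp_le (by simpa using hc)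
      refine ⟨m, hres, ?_, tLe_trans hble2 hb2m, ?_⟩
      · rcases hmem with hm | ⟨t', ht', hmt'⟩
        · by_cases hc : tLt b (d, l, r) = true
          · rw [if_pos hc] at hm
            refine Or.inr ⟨(d, l, r), by simp, ?_⟩
            rw [genList_eq, hm]
            exact List.mem_cons_self
          · rw [if_neg hc] at hm
            exact Or.inl hm
        · simp only [dite_eq_ite, List.mem_append] at ht'
          rcases ht' with (h1 | h1) | h1
          · by_cases g : seatOf n l r + 1 ≤ r
            · rw [if_pos g] at h1
              simp at h1
              refine Or.inr ⟨(d, l, r), by simp, ?_⟩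
              rw [genList_eq, List.mem_cons, List.mem_append]
              exact Or.inr (Or.inr (by rw [if_pos g]; exact h1 ▸ hmt'))
            · rw [if_neg g] at h1; simp at h1
          · by_cases g : l ≤ seatOf n l r - 1
            · rw [if_pos g] at h1
              simp at h1
              refine Or.inr ⟨(d, l, r), by simp, ?_⟩
              rw [genList_eq, List.mem_cons, List.mem_append]
              exact Or.inr (Or.inl (by rw [if_pos g]; exact h1 ▸ hmt'))
            · rw [if_neg g] at h1; simp at h1
          · exact Or.inr ⟨t', List.mem_cons.mpr (Or.inr h1), hmt'⟩
      · intro t'' ht'' y hy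
        rcases List.mem_cons.mp ht'' with h1 | h1
        · subst h1
          rw [genList_eq, List.mem_cons, List.mem_append] at hy
          rcases hy with hy | hy | hy
          · rw [hy]; exact tLe_trans htle2 hb2m
          · by_cases g : l ≤ seatOf n l r - 1
            · rw [if_pos g] at hy
              refine hdom (childL l (seatOf n l r)) ?_ y hy
              simp only [dite_eq_ite, List.mem_append]
              exact Or.inl (Or.inr (by rw [if_pos g]; simp))
            · rw [if_neg g] at hy; simp at hy
          · by_cases g : seatOf n l r + 1 ≤ r
            · rw [if_pos g] at hy
              refine hdom (childR r (seatOf n l r)) ?_ y hy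
              simp only [dite_eq_ite, List.mem_append]
              exact Or.inl (Or.inl (by rw [if_pos g]; simp))
            · rw [if_neg g] at hy; simp at hy
        · refine hdom t'' ?_ y hy
          simp only [dite_eq_ite, List.mem_append]
          exact Or.inr h1

-- ===== VERDICT (by name: the statement is the Claim_ definition above) =====
theorem last_chair_spec : Claim_equal_last_chair := by
  intro n _
  unfold Spec_last_chair last_chair last_chair_alt
  have hpush0 : hpush (-(n - 1), 1, n) SHeap.leaf =
      SHeap.node (-(n - 1), 1, n) SHeap.leaf SHeap.leaf := by
    simp [hpush, hmerge]
  rw [foldl_const_eq_iter, PySem.List.length_pyRange_one, hpush0]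
  have hlen : ((n - 1 : Int) - 0).toNat = (n - 1).toNat := by omega
  rw [hlen]
  have hseat : seatOf n 1 n = 1 := by simp [seatOf]
  have hnoL : ¬ (1 : Int) ≤ seatOf n 1 n - 1 := by rw [hseat]; omega
  by_cases hn : 2 ≤ n
  · -- n ≥ 2
    have hHO0 : HO (SHeap.node (-(n - 1), 1, n) SHeap.leaf SHeap.leaf) := by
      refine ⟨?_, trivial, trivial⟩
      intro y hy
      have : y = (-(n - 1), 1, n) := by simpa [toL] using hy
      rw [this]; exact tLe_refl _
    have hP0 : AllP (SHeap.node (-(n - 1), 1, n) SHeap.leaf SHeap.leaf) := by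
      intro t ht
      have : t = (-(n - 1), 1, n) := by simpa [toL] using ht
      rw [this]; simp [POK]
    have hSz0 : AllSz (SHeap.node (-(n - 1), 1, n) SHeap.leaf SHeap.leaf) := by
      intro t ht
      have : t = (-(n - 1), 1, n) := by simpa [toL] using ht
      rw [this]; simp; omega
    have hTot0 : totalSize (SHeap.node (-(n - 1), 1, n) SHeap.leaf SHeap.leaf) = (n - 1).toNat + 1 := by
      simp [totalSize, toL, sz]; omega
    obtain ⟨d, l, r, hl', hr', hiter, hamem, hadom⟩ :=
      main_lemma n (n - 1).toNat _ hHO0 hP0 hSz0 hTot0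
    rw [hiter]
    have hgens : gens n (SHeap.node (-(n - 1), 1, n) SHeap.leaf SHeap.leaf) =
        genList n (-(n - 1), 1, n) := by
      simp [gens, toL]
    rw [hgens] at hamem hadom
    -- B side: unfold the first loop iteration
    obtain ⟨m, hbres, hbmem, hb0m, hbdom⟩ := bLoop_spec n
      ((if seatOf n 1 n + 1 ≤ n then [childR n (seatOf n 1 n)] else []) ++
       (if (1 : Int) ≤ seatOf n 1 n - 1 then [childL 1 (seatOf n 1 n)] else []) ++ [])
      (some (-(n - 1), 1, n)) (-(n - 1), 1, n) rfl
    have hstep : bLoop n [(-(n - 1), 1, n)] none =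
        bLoop n ((if seatOf n 1 n + 1 ≤ n then [childR n (seatOf n 1 n)] else []) ++
          (if (1 : Int) ≤ seatOf n 1 n - 1 then [childL 1 (seatOf n 1 n)] else []) ++ [])
          (some (-(n - 1), 1, n)) := by
      rw [bLoop]
    rw [hstep, hbres]
    -- identify the two maxima
    have hmgen : m ∈ genList n (-(n - 1), 1, n) := by
      rcases hbmem with hm | ⟨t', ht', hmt'⟩
      · rw [hm, genList_eq]; exact List.mem_cons_self
      · rw [List.mem_append, List.mem_append] at ht'
        rcases ht' with (h1 | h1) | h1
        · by_cases g : seatOf n 1 n + 1 ≤ n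
          · rw [if_pos g] at h1; simp at h1
            rw [genList_eq, List.mem_cons, List.mem_append]
            exact Or.inr (Or.inr (by rw [if_pos g]; exact h1 ▸ hmt'))
          · rw [if_neg g] at h1; simp at h1
        · rw [if_neg hnoL] at h1; simp at h1
        · simp at h1
    have hage : tLe m (d, l, r) = true := hadom m hmgen
    have hmge : tLe (d, l, r) m = true := by
      rw [genList_eq, List.mem_cons, List.mem_append] at hamem
      rcases hamem with ha | ha | ha
      · rw [ha]; exact hb0m
      · rw [if_neg hnoL] at ha; simp at ha
      · by_cases g : seatOf n 1 n + 1 ≤ n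
        · rw [if_pos g] at ha
          refine hbdom (childR n (seatOf n 1 n)) ?_ _ ha
          rw [List.mem_append, List.mem_append]
          exact Or.inl (Or.inl (by rw [if_pos g]; simp))
        · rw [if_neg g] at ha; simp at ha
    have : (d, l, r) = m := tLe_antisymm hmge hage
    rw [← this]
  · -- n ≤ 1: no loop iterations on either side
    have hz : (n - 1).toNat = 0 := by omega
    rw [hz]
    have hnoR : ¬ seatOf n 1 n + 1 ≤ n := by rw [hseat]; omega
    have hB : bLoop n [(-(n - 1), 1, n)] none = some (-(n - 1), 1, n) := by
      rw [bLoop]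
      simp only [if_neg hnoL, if_neg hnoR, List.append_nil]
      rw [bLoop]
    rw [hB]
    simp [aIter]
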